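-- pv_equiv track=rewrite | github.com/Humorloos/SMR | smr/xontology.py | get_question_sets
-- ===== SOURCE A (Python) =====
-- def get_question_sets(q_id_elements):
--     # Sort triples by question id for Triples pertaining to the same
--     # question to appear next to each other
--     ascendingQId = sorted(q_id_elements, key=lambda t: t['q_id'])
--     questionList = []
--
--     # Initiate tripleList with first triple
--     tripleList = [ascendingQId[0]]
--     for x, t in enumerate(ascendingQId[0:-1], start=1):
--
--         # Add the triple to the questionList if the next triple has a
--         # different question id
--         if t['q_id'] != ascendingQId[x]['q_id']:
--             questionList.append(tripleList)
--             tripleList = [ascendingQId[x]]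
--
--         # Add the triple to the tripleList if it pertains to the same
--         # question as the next triple
--         else:
--             tripleList.append(ascendingQId[x])
--
--     # Finally add the last triple_list to the question_list
--     questionList.append(tripleList)
--     return questionList
-- ===== SOURCE B (Python) =====
-- def get_question_sets(q_id_elements):
--     # Group triples by question id in one pass (insertion order preserves the
--     # original within-group order, matching A's stable sort), then emit the
--     # groups over the sorted distinct question ids.
--     groups = {}
--     for t in q_id_elements:
--         groups.setdefault(t['q_id'], []).append(t)
--     return [groups[k] for k in sorted(groups)]
-- ===== Notes on version B (the rewrite author's own statement) =====
-- stated objective: simpler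
-- what changed: A stable-sorts all triples and splits them by comparing consecutive question ids; B groups the triples into an insertion-ordered dict in one pass and emits the buckets over the sorted distinct ids.
import Mathlib
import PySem

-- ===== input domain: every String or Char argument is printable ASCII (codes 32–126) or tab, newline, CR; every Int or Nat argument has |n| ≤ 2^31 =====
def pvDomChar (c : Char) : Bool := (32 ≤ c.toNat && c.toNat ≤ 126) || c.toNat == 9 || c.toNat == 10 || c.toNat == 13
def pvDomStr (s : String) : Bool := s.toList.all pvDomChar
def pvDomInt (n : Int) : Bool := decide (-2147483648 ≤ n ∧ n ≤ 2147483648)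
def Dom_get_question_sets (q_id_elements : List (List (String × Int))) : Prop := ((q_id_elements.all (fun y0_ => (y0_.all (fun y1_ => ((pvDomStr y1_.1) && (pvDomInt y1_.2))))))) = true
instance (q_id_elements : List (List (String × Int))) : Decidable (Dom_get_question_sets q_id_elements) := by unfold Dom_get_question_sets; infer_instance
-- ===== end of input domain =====

-- B replaces A's sort-everything-then-split-consecutive-runs loop by a one-pass
-- dict grouping followed by an emit over the sorted distinct question ids (simpler).


-- t['q_id'] (a Python dict lookup; the default 0 is only reached outside Pre_, where Python raises KeyError)
def pvQid (t : List (String × Int)) : Int := ((PySem.Dict.mk t).get? "q_id").getD 0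

-- ===== PORT A =====
def get_question_sets (q_id_elements : List (List (String × Int))) : List (List (List (String × Int))) :=
  let ascendingQId := PySem.List.sorted q_id_elements pvQid
  -- ascendingQId[0]: IndexError on the empty list, excluded by Pre_
  let tripleList := [PySem.List.pyGetD ascendingQId 0 []]
  let st := (PySem.List.enumerate (PySem.List.slice ascendingQId (some 0) (some (-1))) 1).foldl
      (fun st xt =>
        if pvQid xt.2 ≠ pvQid (PySem.List.pyGetD ascendingQId xt.1 []) then
          (st.1 ++ [st.2], [PySem.List.pyGetD ascendingQId xt.1 []])
        else
          (st.1, st.2 ++ [PySem.List.pyGetD ascendingQId xt.1 []]))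
      (([] : List (List (List (String × Int)))), tripleList)
  st.1 ++ [st.2]

-- ===== PORT B =====
def get_question_sets_alt (q_id_elements : List (List (String × Int))) : List (List (List (String × Int))) :=
  let groups : PySem.Dict Int (List (List (String × Int))) :=
    q_id_elements.foldl (fun d t => d.modify (pvQid t) [] (fun g => g ++ [t])) PySem.Dict.empty
  (PySem.List.sorted groups.keys (fun k => k)).map (fun k => groups.getD k [])

-- ===== PRECONDITION & SPEC =====
-- Pre_ excludes the empty list (A's ascendingQId[0] raises IndexError there) and
-- triples without a 'q_id' key (A's sort key raises KeyError there).
def Pre_get_question_sets (q_id_elements : List (List (String × Int))) : Prop :=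
  q_id_elements ≠ [] ∧ ∀ t ∈ q_id_elements, "q_id" ∈ t.map Prod.fst
instance (q_id_elements : List (List (String × Int))) : Decidable (Pre_get_question_sets q_id_elements) := by unfold Pre_get_question_sets; infer_instance
def pvWitness_get_question_sets : (List (List (String × Int))) := [[("q_id", 2)], [("q_id", 1)]]

def Spec_get_question_sets (q_id_elements : List (List (String × Int))) (out : List (List (List (String × Int)))) : Prop := out = get_question_sets_alt q_id_elements
instance (q_id_elements : List (List (String × Int))) (out : List (List (List (String × Int)))) : Decidable (Spec_get_question_sets q_id_elements out) := by unfold Spec_get_question_sets; infer_instance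

-- ===== CLAIM (what is proved, stated in full; the proofs are below) =====
def Claim_equal_get_question_sets : Prop := ∀ (q_id_elements : List (List (String × Int))), Dom_get_question_sets q_id_elements → Pre_get_question_sets q_id_elements → Spec_get_question_sets q_id_elements (get_question_sets q_id_elements)

-- ===== LEMMAS AND PROOFS =====

def pvKeys (l : List (List (String × Int))) : List Int :=
  PySem.List.sorted (PySem.Set.ofList (l.map pvQid)) (fun k => k)
def pvBlk (l : List (List (String × Int))) (k : Int) : List (List (String × Int)) :=
  l.filter (fun t => pvQid t == k)

theorem pv_alt_eq (l : List (List (String × Int))) :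
    get_question_sets_alt l = (pvKeys l).map (pvBlk l) := by
  unfold get_question_sets_alt
  have hkeys : (l.foldl (fun d t => d.modify (pvQid t) [] (fun g => g ++ [t])) PySem.Dict.empty).keys
      = PySem.Set.ofList (l.map pvQid) := by
    rw [PySem.Dict.keys_foldl_modify_key l pvQid [] (fun _ t g => g ++ [t])]
    simp [PySem.Dict.keys_empty]
    rfl
  have hfold : (l.foldl (fun d t => d.modify (pvQid t) [] (fun g => g ++ [t])) PySem.Dict.empty)
      = ((l.map (fun t => (pvQid t, t))).foldl (fun d p => d.modify p.1 [] (fun g => g ++ [p.2])) PySem.Dict.empty) := by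
    rw [List.foldl_map]
  have hgetD : ∀ k, (l.foldl (fun d t => d.modify (pvQid t) [] (fun g => g ++ [t])) PySem.Dict.empty).getD k []
      = pvBlk l k := by
    intro k
    rw [hfold, PySem.Dict.getD_foldl_modify_append]
    simp [List.filter_map, pvBlk, Function.comp_def]
  simp only [hkeys, pvKeys]
  apply List.map_congr_left
  intro k _
  exact hgetD k

def pvChunk (qL : List (List (List (String × Int)))) (tL : List (List (String × Int)))
    (t : List (String × Int)) : List (List (String × Int)) → List (List (List (String × Int)))
  | [] => qL ++ [tL]
  | n :: rest =>
    if pvQid t ≠ pvQid n then pvChunk (qL ++ [tL]) [n] n rest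
    else pvChunk qL (tL ++ [n]) n rest

theorem pv_enum_zip (s : List (List (String × Int))) :
    (PySem.List.enumerate s.dropLast 1).map
        (fun xt => (xt.2, PySem.List.pyGetD s xt.1 [])) = s.dropLast.zip s.tail := by
  apply List.ext_getElem
  · simp [PySem.List.length_enumerate, List.length_dropLast, List.length_tail]
  · intro k h1 h2
    have hk : k < s.length - 1 := by
      simpa [PySem.List.length_enumerate] using h1
    simp only [List.getElem_map, PySem.List.getElem_enumerate, List.getElem_zip,
      List.getElem_dropLast, List.getElem_tail]
    have : (1 : Int) + (k : Int) = ((k + 1 : Nat) : Int) := by push_cast; ring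
    rw [this, PySem.List.pyGetD_natCast]
    rw [List.getD_eq_getElem s [] (by omega)]

theorem pv_zip_chunk (rest : List (List (String × Int))) :
    ∀ t qL tL,
      (let st := ((t :: rest).dropLast.zip (t :: rest).tail).foldl
          (fun st p =>
            if pvQid p.1 ≠ pvQid p.2 then (st.1 ++ [st.2], [p.2]) else (st.1, st.2 ++ [p.2]))
          (qL, tL);
        st.1 ++ [st.2]) = pvChunk qL tL t rest := by
  induction rest with
  | nil => intro t qL tL; simp [pvChunk]
  | cons n rest ih =>
    intro t qL tL
    have hd : (t :: n :: rest).dropLast = t :: (n :: rest).dropLast := by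
      simp [List.dropLast_cons_of_ne_nil]
    simp only [List.tail_cons, hd, List.zip_cons_cons, List.foldl_cons]
    by_cases h : pvQid t ≠ pvQid n
    · simpa [pvChunk, h] using ih n (qL ++ [tL]) [n]
    · simpa [pvChunk, h] using ih n qL (tL ++ [n])

theorem pv_chunk_within (b : List (List (String × Int))) :
    ∀ rest t qL tL, (∀ u ∈ b, pvQid u = pvQid t) →
      pvChunk qL tL t (b ++ rest) = pvChunk qL (tL ++ b) (b.getLastD t) rest := by
  induction b with
  | nil => intro rest t qL tL _; simp
  | cons u b ih =>
    intro rest t qL tL hb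
    have hu : pvQid u = pvQid t := hb u (by simp)
    have : ∀ v ∈ b, pvQid v = pvQid u := fun v hv => (hb v (by simp [hv])).trans hu.symm
    have hlast : (u :: b).getLastD t = b.getLastD u := by cases b <;> rfl
    simp only [List.cons_append, pvChunk]
    rw [if_neg (by simp [hu]), ih rest u qL (tL ++ [u]) this, hlast]
    simp

theorem pv_chunk_blocks (g : Int → List (List (String × Int))) (S : List Int) :
    S.Nodup → (∀ k ∈ S, ∀ u ∈ g k, pvQid u = k) → (∀ k ∈ S, g k ≠ []) →
    ∀ t qL tL, pvQid t ∉ S →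
      pvChunk qL tL t (S.map g).flatten = (qL ++ [tL]) ++ S.map g := by
  induction S with
  | nil => intro _ _ _ t qL tL _; simp [pvChunk]
  | cons k S ih =>
    intro hnd hkey hne t qL tL hmem
    obtain ⟨u, b, hgk⟩ : ∃ u b, g k = u :: b := by
      cases h : g k with
      | nil => exact absurd h (hne k (by simp))
      | cons u b => exact ⟨u, b, rfl⟩
    have hku : pvQid u = k := hkey k (by simp) u (by simp [hgk])
    have hbk : ∀ v ∈ b, pvQid v = pvQid u := by
      intro v hv; rw [hku]; exact hkey k (by simp) v (by simp [hgk, hv])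
    simp only [List.map_cons, List.flatten_cons, hgk, List.cons_append]
    have hne' : pvQid t ≠ pvQid u := by rw [hku]; intro h; exact hmem (by simp [h])
    rw [pvChunk, if_pos hne']
    rw [pv_chunk_within b _ u (qL ++ [tL]) [u] hbk]
    have hlastk : pvQid (b.getLastD u) ∉ S := by
      have hm : b.getLastD u ∈ u :: b := List.getLastD_mem_cons
      have : pvQid (b.getLastD u) = k := hkey k (by simp) _ (by rw [hgk]; exact hm)
      rw [this]; exact (List.nodup_cons.mp hnd).1
    rw [ih (List.nodup_cons.mp hnd).2 (fun k' h' => hkey k' (by simp [h'])) (fun k' h' => hne k' (by simp [h'])) _ _ _ hlastk]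
    simp

theorem pv_insertBy_skip (t : List (String × Int)) (b : List (List (String × Int))) :
    ∀ ys, (∀ u ∈ b, ¬ pvQid t < pvQid u) →
    PySem.List.insertBy (fun a b => decide (pvQid a < pvQid b)) t (b ++ ys)
      = b ++ PySem.List.insertBy (fun a b => decide (pvQid a < pvQid b)) t ys := by
  induction b with
  | nil => intro ys _; simp
  | cons u b ih =>
    intro ys hb
    simp only [List.cons_append, PySem.List.insertBy]
    rw [if_neg (by simpa using hb u (by simp)), ih ys (fun v hv => hb v (by simp [hv]))]

theorem pv_insertBy_front (t : List (String × Int)) (ys : List (List (String × Int)))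
    (h : ∀ u ∈ ys, pvQid t < pvQid u) :
    PySem.List.insertBy (fun a b => decide (pvQid a < pvQid b)) t ys = t :: ys := by
  cases ys with
  | nil => rfl
  | cons u ys => simp only [PySem.List.insertBy]; rw [if_pos (by simpa using h u (by simp))]

theorem pv_insert_old (t : List (String × Int)) (g : Int → List (List (String × Int))) (S : List Int) :
    S.Pairwise (· < ·) → (∀ k ∈ S, ∀ u ∈ g k, pvQid u = k) → pvQid t ∈ S →
    PySem.List.insertBy (fun a b => decide (pvQid a < pvQid b)) t (S.map g).flatten
      = (S.map (fun k => if k = pvQid t then g k ++ [t] else g k)).flatten := by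
  induction S with
  | nil => intro _ _ h; simp at h
  | cons k S ih =>
    intro hpw hkey hmem
    simp only [List.map_cons, List.flatten_cons]
    by_cases hk : k = pvQid t
    · rw [pv_insertBy_skip t (g k) _ (fun u hu => by rw [hkey k (by simp) u hu, hk]; omega)]
      rw [pv_insertBy_front t _ (fun u hu => by
        obtain ⟨b, hbS, hub⟩ := List.mem_flatten.mp hu
        obtain ⟨k', hk', rfl⟩ := List.mem_map.mp hbS
        rw [hkey k' (by simp [hk']) u hub, ← hk]
        exact (List.pairwise_cons.mp hpw).1 k' hk')]
      rw [if_pos hk]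
      have hmapS : S.map (fun k' => if k' = pvQid t then g k' ++ [t] else g k') = S.map g :=
        List.map_congr_left (fun k' hk' => if_neg (by
          have := (List.pairwise_cons.mp hpw).1 k' hk'; omega))
      rw [hmapS]; simp
    · have hmem' : pvQid t ∈ S := by
        rcases List.mem_cons.mp hmem with h | h
        · exact absurd h.symm hk
        · exact h
      rw [pv_insertBy_skip t (g k) _ (fun u hu => by
        rw [hkey k (by simp) u hu]
        have := (List.pairwise_cons.mp hpw).1 _ hmem'; omega)]
      rw [ih (List.pairwise_cons.mp hpw).2 (fun k' h' => hkey k' (by simp [h'])) hmem']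
      rw [if_neg hk]

theorem pv_insert_new (t : List (String × Int)) (g : Int → List (List (String × Int))) (S : List Int) :
    S.Pairwise (· < ·) → (∀ k ∈ S, ∀ u ∈ g k, pvQid u = k) → (∀ k ∈ S, g k ≠ []) →
    pvQid t ∉ S →
    PySem.List.insertBy (fun a b => decide (pvQid a < pvQid b)) t (S.map g).flatten
      = ((PySem.List.insertBy (fun a b => decide (a < b)) (pvQid t) S).map
          (fun k => if k = pvQid t then [t] else g k)).flatten := by
  induction S with
  | nil => intro _ _ _ _; simp [PySem.List.insertBy]
  | cons k S ih =>
    intro hpw hkey hne hmem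
    have hkne : k ≠ pvQid t := fun h => hmem (by simp [h])
    simp only [List.map_cons, List.flatten_cons, PySem.List.insertBy]
    by_cases hlt : pvQid t < k
    · rw [if_pos (by simpa using hlt)]
      rw [pv_insertBy_front t _ (fun u hu => by
        rcases List.mem_append.mp hu with h | h
        · rw [hkey k (by simp) u h]; exact hlt
        · obtain ⟨b, hbS, hub⟩ := List.mem_flatten.mp h
          obtain ⟨k', hk', rfl⟩ := List.mem_map.mp hbS
          rw [hkey k' (by simp [hk']) u hub]
          have := (List.pairwise_cons.mp hpw).1 k' hk'; omega)]
      simp only [List.map_cons, List.flatten_cons]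
      have hmapS : S.map (fun k' => if k' = pvQid t then [t] else g k') = S.map g :=
        List.map_congr_left (fun k' hk' => if_neg (by
          have := (List.pairwise_cons.mp hpw).1 k' hk'; omega))
      rw [if_neg hkne, hmapS]
      simp
    · rw [if_neg (by simpa using hlt)]
      rw [pv_insertBy_skip t (g k) _ (fun u hu => by rw [hkey k (by simp) u hu]; exact hlt)]
      rw [ih (List.pairwise_cons.mp hpw).2 (fun k' h' => hkey k' (by simp [h']))
        (fun k' h' => hne k' (by simp [h'])) (fun h => hmem (by simp [h]))]
      simp only [List.map_cons, List.flatten_cons, if_neg hkne]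

theorem pvKeys_pairwise (l : List (List (String × Int))) : (pvKeys l).Pairwise (· < ·) := by
  have h1 := PySem.List.sorted_pairwise (PySem.Set.ofList (l.map pvQid)) (fun k => k)
  have h2 : (pvKeys l).Nodup :=
    (PySem.List.sorted_perm (PySem.Set.ofList (l.map pvQid)) (fun k => k) false).symm.nodup
      (PySem.Set.nodup_ofList _)
  exact (h1.and h2).imp (fun h => lt_of_le_of_ne h.1 h.2)

theorem pvKeys_mem (l : List (List (String × Int))) (k : Int) :
    k ∈ pvKeys l ↔ k ∈ l.map pvQid := by
  rw [pvKeys, PySem.List.mem_sorted, PySem.Set.mem_ofList]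

theorem pvBlk_key (l : List (List (String × Int))) (k : Int) :
    ∀ u ∈ pvBlk l k, pvQid u = k := by
  intro u hu
  have := (List.mem_filter.mp hu).2
  simpa using this

theorem pvBlk_ne (l : List (List (String × Int))) (k : Int) (h : k ∈ l.map pvQid) :
    pvBlk l k ≠ [] := by
  obtain ⟨u, hu, rfl⟩ := List.mem_map.mp h
  intro hnil
  have : u ∈ pvBlk l (pvQid u) := List.mem_filter.mpr ⟨hu, by simp⟩
  rw [hnil] at this; simp at this

theorem pv_sorted_snoc {α κ : Type} [LinearOrder κ] (l : List α) (t : α) (key : α → κ) :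
    PySem.List.sorted (l ++ [t]) key
      = PySem.List.insertBy (fun a b => decide (key a < key b)) t (PySem.List.sorted l key) := by
  rw [PySem.List.sorted_eq_foldl_insertBy, PySem.List.sorted_eq_foldl_insertBy, List.foldl_append]
  rfl

theorem pv_keyset_snoc (l : List (List (String × Int))) (t : List (String × Int)) :
    PySem.Set.ofList ((l ++ [t]).map pvQid)
      = PySem.Set.add (PySem.Set.ofList (l.map pvQid)) (pvQid t) := by
  rw [List.map_append, PySem.Set.ofList_eq_foldl, PySem.Set.ofList_eq_foldl, List.foldl_append]
  rfl

theorem pvBlk_snoc (l : List (List (String × Int))) (t : List (String × Int)) (k : Int) :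
    pvBlk (l ++ [t]) k = pvBlk l k ++ if pvQid t = k then [t] else [] := by
  rw [pvBlk, List.filter_append]
  congr 1
  by_cases h : pvQid t = k <;> simp [h]

theorem pv_sorted_eq_flatten (l : List (List (String × Int))) :
    PySem.List.sorted l pvQid = ((pvKeys l).map (pvBlk l)).flatten := by
  induction l using List.reverseRecOn with
  | nil => rfl
  | append_singleton l t ih =>
    rw [pv_sorted_snoc, ih]
    by_cases hm : pvQid t ∈ l.map pvQid
    · have hks : pvKeys (l ++ [t]) = pvKeys l := by
        rw [pvKeys, pv_keyset_snoc, PySem.Set.add_eq_ite,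
          if_pos ((PySem.Set.mem_ofList _ _).mpr hm)]
        rfl
      rw [pv_insert_old t (pvBlk l) (pvKeys l) (pvKeys_pairwise l)
        (fun k _ => pvBlk_key l k) ((pvKeys_mem l _).mpr hm), hks]
      congr 1
      apply List.map_congr_left
      intro k hk
      rw [pvBlk_snoc]
      by_cases h : k = pvQid t
      · rw [if_pos h, if_pos h.symm]
      · rw [if_neg h, if_neg (fun hh => h hh.symm)]; simp
    · have hks : pvKeys (l ++ [t])
          = PySem.List.insertBy (fun a b => decide (a < b)) (pvQid t) (pvKeys l) := by
        rw [pvKeys, pv_keyset_snoc, PySem.Set.add_eq_ite,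
          if_neg (fun hh => hm ((PySem.Set.mem_ofList _ _).mp hh))]
        have := pv_sorted_snoc (PySem.Set.ofList (l.map pvQid)) (pvQid t) (fun k => k)
        exact this
      rw [pv_insert_new t (pvBlk l) (pvKeys l) (pvKeys_pairwise l)
        (fun k _ => pvBlk_key l k)
        (fun k hk => pvBlk_ne l k ((pvKeys_mem l k).mp hk))
        (fun hh => hm ((pvKeys_mem l _).mp hh)), hks]
      congr 1
      apply List.map_congr_left
      intro k hk
      rcases (PySem.List.mem_insertBy _ _ _ _).mp hk with h | h
      · rw [if_pos h, h, pvBlk_snoc, if_pos rfl]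
        have : pvBlk l (pvQid t) = [] := by
          cases hnil : pvBlk l (pvQid t) with
          | nil => rfl
          | cons v vs =>
            have hv : v ∈ pvBlk l (pvQid t) := by rw [hnil]; simp
            have := pvBlk_key l (pvQid t) v hv
            exact absurd (List.mem_map.mpr ⟨v, (List.mem_filter.mp hv).1, this⟩) hm
        rw [this]; rfl
      · have hne : k ≠ pvQid t := fun hh => hm ((pvKeys_mem l (pvQid t)).mp (hh ▸ h))
        rw [if_neg hne, pvBlk_snoc, if_neg (fun hh => hne hh.symm)]
        simp

theorem pv_enum_fold (s : List (List (String × Int)))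
    (init : List (List (List (String × Int))) × List (List (String × Int))) :
    (PySem.List.enumerate s.dropLast 1).foldl
      (fun st xt =>
        if pvQid xt.2 ≠ pvQid (PySem.List.pyGetD s xt.1 []) then
          (st.1 ++ [st.2], [PySem.List.pyGetD s xt.1 []])
        else
          (st.1, st.2 ++ [PySem.List.pyGetD s xt.1 []])) init
    = (s.dropLast.zip s.tail).foldl
      (fun st p =>
        if pvQid p.1 ≠ pvQid p.2 then (st.1 ++ [st.2], [p.2]) else (st.1, st.2 ++ [p.2])) init := by
  rw [← pv_enum_zip s, List.foldl_map]

theorem pv_a_eq (l : List (List (String × Int))) (h : l ≠ []) :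
    get_question_sets l = (pvKeys l).map (pvBlk l) := by
  unfold get_question_sets
  simp only [PySem.List.slice_zero_start, PySem.List.slice_to_neg_one]
  rw [pv_enum_fold]
  -- the sorted list is nonempty: write it as head :: tail
  have hs : PySem.List.sorted l pvQid ≠ [] := by
    rw [ne_eq, PySem.List.sorted_eq_nil_iff]; exact h
  obtain ⟨u, rest, hcons⟩ := List.exists_cons_of_ne_nil hs
  rw [hcons]
  have h0 : PySem.List.pyGetD (u :: rest) 0 [] = u := by
    rw [show (0 : Int) = ((0 : Nat) : Int) from rfl, PySem.List.pyGetD_natCast]; rfl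
  rw [h0, pv_zip_chunk rest u [] [u]]
  -- decompose into blocks
  have hflat := pv_sorted_eq_flatten l
  rw [hcons] at hflat
  cases hK : pvKeys l with
  | nil => rw [hK] at hflat; simp at hflat
  | cons k S =>
    rw [hK] at hflat
    simp only [List.map_cons, List.flatten_cons] at hflat
    cases hB : pvBlk l k with
    | nil =>
      exact absurd hB (pvBlk_ne l k ((pvKeys_mem l k).mp (by rw [hK]; simp)))
    | cons v b =>
      rw [hB] at hflat
      have hu : u = v := by simpa using congrArg (fun x => x.headD []) hflat
      have hrest : rest = b ++ (S.map (pvBlk l)).flatten := by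
        simpa using congrArg List.tail hflat
      subst hu
      rw [hrest]
      have hks := pvKeys_pairwise l
      rw [hK] at hks
      have hkey : ∀ k' ∈ k :: S, ∀ w ∈ pvBlk l k', pvQid w = k' := fun k' _ => pvBlk_key l k'
      have hbk : ∀ w ∈ b, pvQid w = pvQid u := by
        intro w hw
        rw [hkey k (by simp) w (by rw [hB]; simp [hw]), hkey k (by simp) u (by rw [hB]; simp)]
      rw [pv_chunk_within b _ u [] [u] hbk]
      have hlast : pvQid (b.getLastD u) = k :=
        hkey k (by simp) _ (by rw [hB]; exact List.getLastD_mem_cons)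
      have hnd : S.Nodup := (List.pairwise_cons.mp hks).2.imp ne_of_lt
      have hnotin : pvQid (b.getLastD u) ∉ S := by
        rw [hlast]; intro hkS
        exact absurd ((List.pairwise_cons.mp hks).1 k hkS) (lt_irrefl k)
      rw [pv_chunk_blocks (pvBlk l) S hnd (fun k' _ => pvBlk_key l k')
        (fun k' hk' => pvBlk_ne l k' ((pvKeys_mem l k').mp (by rw [hK]; exact List.mem_cons_of_mem _ hk')))
        _ [] ([u] ++ b) hnotin]
      simp [hB]

-- ===== VERDICT (by name: the statement is the Claim_ definition above) =====
theorem get_question_sets_spec : Claim_equal_get_question_sets := by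
  intro l _ hpre
  unfold Spec_get_question_sets
  rw [pv_a_eq l hpre.1, pv_alt_eq]
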